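-- pv_equiv track=rewrite | github.com/h2oai/h2ogpt | src/utils.py | undo_reverse_ucurve_list
-- ===== SOURCE A (Python) =====
-- def undo_reverse_ucurve_list(lst):
--     if not lst:
--         return []
--     if len(lst) == 1:
--         return lst
--     if len(lst) == 2:
--         return [lst[1], lst[0]]
--
--     # Split the list into two halves: the first half and the second half (reversed)
--     mid = len(lst) // 2
--     first_half = lst[:mid]
--     second_half = lst[mid:][::-1]
--
--     # Merge the two halves by taking elements alternatively from the second half and then the first half
--     result = []
--     for i in range(mid):
--         result.append(second_half[i])
--         result.append(first_half[i])
--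
--     # If the length of the list is odd, append the last element of the second half
--     if len(lst) % 2 != 0:
--         result.append(second_half[-1])
--
--     return result
-- ===== SOURCE B (Python) =====
-- def undo_reverse_ucurve_list(lst):
--     if len(lst) == 1:
--         return lst
--     out = []
--     left, right = 0, len(lst) - 1
--     while left < right:
--         out.append(lst[right])
--         out.append(lst[left])
--         left += 1
--         right -= 1
--     if left == right:
--         out.append(lst[left])
--     return out
-- ===== Notes on version B (the rewrite author's own statement) =====
-- stated objective: simpler
-- what changed: Replaced the half-splitting (slice, reversed copy, indexed merge loop plus odd-length fixup) by a single two-pointer sweep that appends lst[right] then lst[left] moving the pointers inward, with the lone middle element appended when the pointers meet.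
import Mathlib
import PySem

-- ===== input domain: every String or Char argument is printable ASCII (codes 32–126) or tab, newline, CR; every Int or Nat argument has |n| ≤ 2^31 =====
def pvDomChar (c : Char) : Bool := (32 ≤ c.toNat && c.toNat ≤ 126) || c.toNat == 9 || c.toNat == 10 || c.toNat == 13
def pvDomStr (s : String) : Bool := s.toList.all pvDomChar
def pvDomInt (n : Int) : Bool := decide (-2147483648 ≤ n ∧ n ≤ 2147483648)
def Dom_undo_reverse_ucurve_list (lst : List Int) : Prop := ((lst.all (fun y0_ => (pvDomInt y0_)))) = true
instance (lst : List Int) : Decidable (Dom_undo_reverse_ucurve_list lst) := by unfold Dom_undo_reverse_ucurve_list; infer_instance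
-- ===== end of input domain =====

-- B replaces A's slice/reverse/merge decomposition by a single two-pointer sweep (same O(n) cost, simpler).

-- ===== PORT A =====
-- Literal port of A. All list indices A uses are in range, so pyGetD with default 0 is exact; lst[mid:][::-1] is reverse of the slice (exact).
def undo_reverse_ucurve_list (lst : List Int) : List Int :=
  if lst = [] then []
  else if lst.length = 1 then lst
  else if lst.length = 2 then [PySem.List.pyGetD lst 1 0, PySem.List.pyGetD lst 0 0]
  else
    let mid : Int := PySem.Int.floordiv (lst.length : Int) 2
    let first_half := PySem.List.slice lst none (some mid)
    let second_half := (PySem.List.slice lst (some mid) none).reverse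
    let result := (PySem.List.pyRange 0 mid 1).foldl
      (fun acc i =>
        (acc ++ [PySem.List.pyGetD second_half i 0]) ++ [PySem.List.pyGetD first_half i 0]) []
    if PySem.Int.mod (lst.length : Int) 2 ≠ 0 then
      result ++ [PySem.List.pyGetD second_half (-1) 0]
    else result

-- ===== PORT B =====
-- The two-pointer while loop of Source B; indices are Int exactly as in Python (right starts at len-1, may be -1).
def pvAltGo (lst out : List Int) (left right : Int) : List Int :=
  if left < right then
    pvAltGo lst ((out ++ [PySem.List.pyGetD lst right 0]) ++ [PySem.List.pyGetD lst left 0])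
      (left + 1) (right - 1)
  else if left = right then out ++ [PySem.List.pyGetD lst left 0]
  else out
termination_by (right - left + 1).toNat
decreasing_by omega

def undo_reverse_ucurve_list_alt (lst : List Int) : List Int :=
  if lst.length = 1 then lst
  else pvAltGo lst [] 0 ((lst.length : Int) - 1)

-- ===== PRECONDITION & SPEC =====
def Spec_undo_reverse_ucurve_list (lst : List Int) (out : List Int) : Prop := out = undo_reverse_ucurve_list_alt lst
instance (lst : List Int) (out : List Int) : Decidable (Spec_undo_reverse_ucurve_list lst out) := by unfold Spec_undo_reverse_ucurve_list; infer_instance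

-- ===== CLAIM (what is proved, stated in full; the proofs are below) =====
def Claim_equal_undo_reverse_ucurve_list : Prop := ∀ (lst : List Int), Dom_undo_reverse_ucurve_list lst → Spec_undo_reverse_ucurve_list lst (undo_reverse_ucurve_list lst)

-- ===== LEMMAS AND PROOFS =====

-- The accumulator of the B loop is only ever extended on the right.
theorem pvAltGo_acc_aux (lst : List Int) : ∀ (k : Nat) (out : List Int) (l r : Int),
    (r - l + 1).toNat = k → pvAltGo lst out l r = out ++ pvAltGo lst [] l r := by
  intro k
  induction k using Nat.strong_induction_on with
  | _ k ih =>
    intro out l r hk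
    by_cases h : l < r
    · rw [pvAltGo, if_pos h]
      conv_rhs => rw [pvAltGo, if_pos h]
      rw [ih ((r - 1) - (l + 1) + 1).toNat (by omega) _ (l + 1) (r - 1) rfl,
          ih ((r - 1) - (l + 1) + 1).toNat (by omega)
            (([] ++ [PySem.List.pyGetD lst r 0]) ++ [PySem.List.pyGetD lst l 0]) (l + 1) (r - 1) rfl]
      simp
    · rw [pvAltGo, if_neg h]
      conv_rhs => rw [pvAltGo, if_neg h]
      by_cases h2 : l = r <;> simp [h2]

theorem pvAltGo_acc (lst : List Int) (out : List Int) (l r : Int) :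
    pvAltGo lst out l r = out ++ pvAltGo lst [] l r :=
  pvAltGo_acc_aux lst (r - l + 1).toNat out l r rfl

-- Key characterisation of the two-pointer loop started at (l, n-1-l).
theorem pvAltGo_eq (lst : List Int) : ∀ (k : Nat) (l : Int), 0 ≤ l →
    ((lst.length : Int) / 2 - l).toNat = k →
    pvAltGo lst [] l ((lst.length : Int) - 1 - l) =
      (PySem.List.pyRange l ((lst.length : Int) / 2) 1).flatMap
        (fun i => [PySem.List.pyGetD lst ((lst.length : Int) - 1 - i) 0,
                   PySem.List.pyGetD lst i 0]) ++
      (if (lst.length : Int) % 2 = 1 ∧ l ≤ (lst.length : Int) / 2 then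
        [PySem.List.pyGetD lst ((lst.length : Int) / 2) 0] else []) := by
  intro k
  induction k using Nat.strong_induction_on with
  | _ k ih =>
    intro l hl hk
    have hn0 : (0 : Int) ≤ (lst.length : Int) := by positivity
    by_cases h : l < (lst.length : Int) - 1 - l
    · have hlm : l < (lst.length : Int) / 2 := by omega
      rw [pvAltGo, if_pos h, pvAltGo_acc]
      have hr : (lst.length : Int) - 1 - l - 1 = (lst.length : Int) - 1 - (l + 1) := by ring
      rw [hr, ih ((lst.length : Int) / 2 - (l + 1)).toNat (by omega) (l + 1) (by omega) rfl]
      rw [PySem.List.pyRange_one_cons hlm]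
      by_cases hodd : (lst.length : Int) % 2 = 1
      · simp [hodd, show l ≤ (lst.length : Int) / 2 by omega,
             show l + 1 ≤ (lst.length : Int) / 2 by omega]
      · simp [hodd]
    · by_cases h2 : l = (lst.length : Int) - 1 - l
      · have hda : (lst.length : Int) % 2 = 1 := by omega
        have hdb : l = (lst.length : Int) / 2 := by omega
        rw [pvAltGo, if_neg h, if_pos h2,
          PySem.List.pyRange_one_eq_nil (by omega)]
        simp [hda, hdb]
      · have : ¬((lst.length : Int) % 2 = 1 ∧ l ≤ (lst.length : Int) / 2) := by omega
        rw [pvAltGo, if_neg h, if_neg h2,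
          PySem.List.pyRange_one_eq_nil (by omega)]
        simp [this]

-- second_half[i] is lst[n-1-i]  (indices in range).
theorem pvGetRevDrop (lst : List Int) (m : Nat) (i : Int) (h0 : 0 ≤ i)
    (h1 : i.toNat < lst.length - m) :
    PySem.List.pyGetD ((lst.drop m).reverse) i 0 =
      PySem.List.pyGetD lst ((lst.length : Int) - 1 - i) 0 := by
  obtain ⟨j, rfl⟩ : ∃ j : ℕ, i = (j : Int) := ⟨i.toNat, by omega⟩
  simp only [Int.toNat_natCast] at h1
  have hj : (lst.length : Int) - 1 - (j : Int) = ((lst.length - 1 - j : Nat) : Int) := by omega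
  rw [hj, PySem.List.pyGetD_natCast, PySem.List.pyGetD_natCast,
    List.getD_eq_getElem?_getD, List.getD_eq_getElem?_getD,
    List.getElem?_reverse (by simp only [List.length_drop]; omega),
    List.getElem?_drop, List.length_drop,
    show m + (lst.length - m - 1 - j) = lst.length - 1 - j from by omega]

-- first_half[i] is lst[i]  (indices in range).
theorem pvGetTake (lst : List Int) (m : Nat) (i : Int) (h0 : 0 ≤ i) (h1 : i.toNat < m) :
    PySem.List.pyGetD (lst.take m) i 0 = PySem.List.pyGetD lst i 0 := by
  obtain ⟨j, rfl⟩ : ∃ j : ℕ, i = (j : Int) := ⟨i.toNat, by omega⟩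
  simp only [Int.toNat_natCast] at h1
  rw [PySem.List.pyGetD_natCast, PySem.List.pyGetD_natCast,
    List.getD_eq_getElem?_getD, List.getD_eq_getElem?_getD,
    List.getElem?_take, if_pos h1]

-- second_half[-1] is lst[m].
theorem pvGetLastRevDrop (lst : List Int) (m : Nat) (hm : m < lst.length) :
    PySem.List.pyGetD ((lst.drop m).reverse) (-1) 0 =
      PySem.List.pyGetD lst ((m : Nat) : Int) 0 := by
  have hne : (lst.drop m).reverse ≠ [] := by
    simp [List.drop_eq_nil_iff]
    omega
  rw [PySem.List.pyGetD_neg_one _ _ hne, PySem.List.pyGetD_natCast,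
    List.getD_eq_getElem?_getD]
  rw [List.getLast_reverse, List.head_drop]
  simp [List.getElem?_eq_getElem hm]

-- ===== VERDICT (by name: the statement is the Claim_ definition above) =====
theorem undo_reverse_ucurve_list_spec : Claim_equal_undo_reverse_ucurve_list := by
  intro lst _
  unfold Spec_undo_reverse_ucurve_list undo_reverse_ucurve_list undo_reverse_ucurve_list_alt
  by_cases h0 : lst = []
  · subst h0
    simp [pvAltGo]
  by_cases h1 : lst.length = 1
  · simp [h0, h1]
  by_cases h2 : lst.length = 2
  · simp only [h0, h2]
    norm_num
    rw [pvAltGo]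
    norm_num
    rw [pvAltGo]
    norm_num
  · have hlen0 : lst.length ≠ 0 := by simpa using h0
    have h3 : 3 ≤ lst.length := by omega
    simp only [h0, h1, h2, ite_false]
    have hfd : PySem.Int.floordiv (lst.length : Int) 2 = ((lst.length / 2 : Nat) : Int) := by
      rw [PySem.Int.floordiv_eq_ediv_of_pos (by norm_num)]
      omega
    have hmd : PySem.Int.mod (lst.length : Int) 2 = ((lst.length % 2 : Nat) : Int) := by
      rw [PySem.Int.mod_eq_emod_of_pos (by norm_num)]
      omega
    have hcast : ((lst.length / 2 : Nat) : Int) = (lst.length : Int) / 2 := by omega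
    rw [hfd, hmd, PySem.List.slice_to_natCast, PySem.List.slice_from_natCast]
    have hpt : ∀ (acc : List Int) (i : Int), i ∈ PySem.List.pyRange 0 ((lst.length / 2 : Nat) : Int) 1 →
        (acc ++ [PySem.List.pyGetD ((lst.drop (lst.length / 2)).reverse) i 0]) ++
          [PySem.List.pyGetD (lst.take (lst.length / 2)) i 0] =
        acc ++ [PySem.List.pyGetD lst ((lst.length : Int) - 1 - i) 0,
          PySem.List.pyGetD lst i 0] := by
      intro acc i hi
      obtain ⟨hi0, hi1⟩ := (PySem.List.mem_pyRange_one).1 hi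
      rw [pvGetRevDrop lst (lst.length / 2) i hi0 (by omega),
        pvGetTake lst (lst.length / 2) i hi0 (by omega)]
      simp
    have hres : List.foldl
        (fun acc i =>
          (acc ++ [PySem.List.pyGetD ((lst.drop (lst.length / 2)).reverse) i 0]) ++
            [PySem.List.pyGetD (lst.take (lst.length / 2)) i 0])
        [] (PySem.List.pyRange 0 ((lst.length / 2 : Nat) : Int) 1) =
        (PySem.List.pyRange 0 ((lst.length : Int) / 2) 1).flatMap
          (fun i => [PySem.List.pyGetD lst ((lst.length : Int) - 1 - i) 0,
                     PySem.List.pyGetD lst i 0]) := by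
      rw [PySem.List.foldl_congr_mem _ _ _ _ hpt, PySem.List.foldl_append_eq_flatMap, hcast]
      simp
    rw [hres]
    have hB : pvAltGo lst [] 0 ((lst.length : Int) - 1) =
        (PySem.List.pyRange 0 ((lst.length : Int) / 2) 1).flatMap
          (fun i => [PySem.List.pyGetD lst ((lst.length : Int) - 1 - i) 0,
                     PySem.List.pyGetD lst i 0]) ++
        (if (lst.length : Int) % 2 = 1 ∧ (0 : Int) ≤ (lst.length : Int) / 2 then
          [PySem.List.pyGetD lst ((lst.length : Int) / 2) 0] else []) := by
      have := pvAltGo_eq lst ((lst.length : Int) / 2 - 0).toNat 0 (by omega) rfl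
      simpa using this
    rw [hB]
    by_cases hodd : lst.length % 2 = 1
    · rw [if_pos (by omega : ¬ ((lst.length % 2 : Nat) : Int) = 0),
        if_pos (by constructor <;> omega)]
      rw [pvGetLastRevDrop lst (lst.length / 2) (by omega), hcast]
    · rw [if_neg (by omega : ¬ ¬ ((lst.length % 2 : Nat) : Int) = 0),
        if_neg (by omega)]
      simp
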